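-- pv_equiv track=rewrite | github.com/zera1004/Coding-Tests | 프로그래머스/0/120842. 2차원으로 만들기/2차원으로 만들기.py | solution
-- ===== SOURCE A (Python) =====
-- def solution(num_list, n):
--     result = []
--     temp = []
--     num = 0
--     for i in num_list:
--         temp.append(i)
--         num += 1
--         if num == n:
--             result.append(temp)
--             temp = []
--             num = 0
--     return result
-- ===== SOURCE B (Python) =====
-- def solution(num_list, n):
--     if n <= 0:
--         return []
--     return [num_list[i * n : i * n + n] for i in range(len(num_list) // n)]
-- ===== Notes on version B (the rewrite author's own statement) =====
-- stated objective: simpler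
-- what changed: Replaces the element-by-element loop with a temp buffer and counter by direct index-driven slicing: after a guard returning [] for n <= 0, the len(num_list)//n complete rows are taken as chunks num_list[i*n:i*n+n], the remainder dropped by the range bound.
import Mathlib
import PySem

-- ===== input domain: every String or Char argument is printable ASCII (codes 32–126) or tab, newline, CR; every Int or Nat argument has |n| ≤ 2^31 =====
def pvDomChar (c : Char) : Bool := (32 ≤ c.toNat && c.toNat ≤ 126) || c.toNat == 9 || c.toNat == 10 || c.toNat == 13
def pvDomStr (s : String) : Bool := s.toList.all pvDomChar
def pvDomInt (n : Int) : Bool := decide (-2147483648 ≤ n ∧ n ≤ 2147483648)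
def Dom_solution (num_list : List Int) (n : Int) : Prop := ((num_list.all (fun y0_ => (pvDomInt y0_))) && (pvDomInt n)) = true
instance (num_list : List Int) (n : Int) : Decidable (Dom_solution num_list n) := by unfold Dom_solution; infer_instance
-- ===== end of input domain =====

-- B replaces A's element-by-element loop (temp buffer + counter) by a guard returning [] for
-- n <= 0 and index-driven slicing of len//n complete chunks; objective: simpler.


-- ===== PORT A =====
def solution (num_list : List Int) (n : Int) : List (List Int) :=
  let s := num_list.foldl
    (fun (st : List (List Int) × List Int × Int) i =>
      let temp := st.2.1 ++ [i]
      let num := st.2.2 + 1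
      if num = n then (st.1 ++ [temp], ([] : List Int), (0 : Int))
      else (st.1, temp, num))
    ([], [], 0)
  s.1

-- ===== PORT B =====
def solution_alt (num_list : List Int) (n : Int) : List (List Int) :=
  if n ≤ 0 then []
  else
    (PySem.List.pyRange 0 (PySem.Int.floordiv (num_list.length : Int) n) 1).map
      (fun i => PySem.List.slice num_list (some (i * n)) (some (i * n + n)))

-- ===== PRECONDITION & SPEC =====
def Spec_solution (num_list : List Int) (n : Int) (out : List (List Int)) : Prop := out = solution_alt num_list n
instance (num_list : List Int) (n : Int) (out : List (List Int)) : Decidable (Spec_solution num_list n out) := by unfold Spec_solution; infer_instance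

-- ===== CLAIM (what is proved, stated in full; the proofs are below) =====
def Claim_equal_solution : Prop := ∀ (num_list : List Int) (n : Int), Dom_solution num_list n → Spec_solution num_list n (solution num_list n)

-- ===== LEMMAS AND PROOFS =====

-- chunks of size n (n ≥ 1 assumed by use sites; n = 0 yields [])
def chunksN (n : Nat) (l : List Int) : List (List Int) :=
  if h : n = 0 ∨ l.length < n then [] else l.take n :: chunksN n (l.drop n)
termination_by l.length
decreasing_by
  simp only [List.length_drop]
  omega

def stepA (n : Int) (st : List (List Int) × List Int × Int) (i : Int) :
    List (List Int) × List Int × Int :=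
  let temp := st.2.1 ++ [i]
  let num := st.2.2 + 1
  if num = n then (st.1 ++ [temp], ([] : List Int), (0 : Int))
  else (st.1, temp, num)

-- abstract version of A's loop body, recursing on the list
def chunkRest (n : Int) (temp : List Int) : List Int → List (List Int)
  | [] => []
  | i :: t =>
      if ((temp.length : Int) + 1) = n then (temp ++ [i]) :: chunkRest n [] t
      else chunkRest n (temp ++ [i]) t

lemma foldlA_eq_chunkRest (n : Int) (l : List Int) :
    ∀ (res : List (List Int)) (temp : List Int),
      (l.foldl (stepA n) (res, temp, (temp.length : Int))).1 = res ++ chunkRest n temp l := by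
  induction l with
  | nil => intro res temp; simp [chunkRest]
  | cons i t ih =>
      intro res temp
      simp only [List.foldl_cons, chunkRest, stepA]
      by_cases h : ((temp.length : Int) + 1) = n
      · simp only [h]
        have := ih (res ++ [temp ++ [i]]) []
        simpa [h] using this
      · have hlen : ((temp ++ [i]).length : Int) = (temp.length : Int) + 1 := by
          simp
        have := ih res (temp ++ [i])
        rw [if_neg h, if_neg h]
        simpa [hlen] using this

lemma chunkRest_eq_chunksN (n : Int) (hn : 1 ≤ n) (l : List Int) :
    ∀ (temp : List Int), (temp.length : Int) < n →
      chunkRest n temp l = chunksN n.toNat (temp ++ l) := by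
  induction l with
  | nil =>
      intro temp htemp
      rw [chunkRest, chunksN]
      rw [dif_pos]
      right
      simp only [List.append_nil]
      omega
  | cons i t ih =>
      intro temp htemp
      rw [chunkRest]
      by_cases h : ((temp.length : Int) + 1) = n
      · rw [if_pos h, chunksN, dif_neg]
        · have hlen : (temp ++ i :: t).take n.toNat = temp ++ [i] ∧
              (temp ++ i :: t).drop n.toNat = t := by
            have htn : n.toNat = temp.length + 1 := by omega
            constructor
            · rw [htn, show temp.length + 1 = (temp ++ [i]).length by simp,
                show temp ++ i :: t = (temp ++ [i]) ++ t by simp]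
              exact List.take_left ..
            · rw [htn, show temp.length + 1 = (temp ++ [i]).length by simp,
                show temp ++ i :: t = (temp ++ [i]) ++ t by simp]
              exact List.drop_left ..
          rw [hlen.1, hlen.2]
          have := ih [] (by simpa using hn)
          simpa using this
        · simp only [not_or, not_lt, List.length_append, List.length_cons]
          omega
      · rw [if_neg h]
        have := ih (temp ++ [i]) (by simp; omega)
        simpa using this

lemma solution_eq_chunksN (num_list : List Int) (n : Int) (hn : 1 ≤ n) :
    solution num_list n = chunksN n.toNat num_list := by
  have h1 : solution num_list n = (num_list.foldl (stepA n) ([], [], ((([] : List Int).length : Int)))).1 := rfl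
  rw [h1, foldlA_eq_chunkRest n num_list [] []]
  simpa using chunkRest_eq_chunksN n hn num_list [] (by simpa using hn)

lemma chunkRest_nonpos (n : Int) (hn : n ≤ 0) (l : List Int) :
    ∀ temp : List Int, chunkRest n temp l = [] := by
  induction l with
  | nil => intro temp; rfl
  | cons i t ih =>
      intro temp
      rw [chunkRest, if_neg (by omega)]
      exact ih _

lemma solution_nonpos (num_list : List Int) (n : Int) (hn : n ≤ 0) :
    solution num_list n = [] := by
  have h1 : solution num_list n = (num_list.foldl (stepA n) ([], [], ((([] : List Int).length : Int)))).1 := rfl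
  rw [h1, foldlA_eq_chunkRest n num_list [] [], chunkRest_nonpos n hn]
  rfl

lemma chunks_index (N : Nat) (hN : 1 ≤ N) (l : List Int) :
    (List.range (l.length / N)).map (fun k => (l.drop (k * N)).take N) = chunksN N l := by
  by_cases h : l.length < N
  · rw [chunksN, dif_pos (Or.inr h), Nat.div_eq_of_lt h]
    simp
  · have hle : N ≤ l.length := le_of_not_gt h
    have ih := chunks_index N hN (l.drop N)
    rw [chunksN, dif_neg (by omega)]
    have hdiv : l.length / N = (l.drop N).length / N + 1 := by
      rw [List.length_drop]
      exact Nat.div_eq_sub_div (by omega) hle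
    rw [hdiv, List.range_succ_eq_map, List.map_cons]
    congr 1
    · simp
    · rw [List.map_map, ← ih]
      apply List.map_congr_left
      intro k _
      show (l.drop ((k + 1) * N)).take N = ((l.drop N).drop (k * N)).take N
      rw [List.drop_drop]
      congr 2
      ring
termination_by l.length
decreasing_by simp only [List.length_drop]; omega

lemma alt_eq_chunksN (num_list : List Int) (n : Int) (hn : 1 ≤ n) :
    solution_alt num_list n = chunksN n.toNat num_list := by
  have hN : 1 ≤ n.toNat := by omega
  have hn' : n = ((n.toNat : Nat) : Int) := by omega
  unfold solution_alt
  rw [if_neg (by omega)]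
  rw [hn', PySem.Int.floordiv_natCast, PySem.List.pyRange_zero_natCast, List.map_map]
  simp only [Int.toNat_natCast]
  rw [← chunks_index n.toNat hN num_list]
  apply List.map_congr_left
  intro k _
  show PySem.List.slice num_list (some ((k : Int) * (n.toNat : Int)))
      (some ((k : Int) * (n.toNat : Int) + (n.toNat : Int)))
    = (num_list.drop (k * n.toNat)).take n.toNat
  have hcast : ((k : Int) * (n.toNat : Int)) = ((k * n.toNat : Nat) : Int) := by push_cast; ring
  rw [hcast]
  exact PySem.List.slice_natCast_add num_list _ _

-- ===== VERDICT (by name: the statement is the Claim_ definition above) =====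
theorem solution_spec : Claim_equal_solution := by
  intro num_list n _
  unfold Spec_solution
  by_cases h : n ≤ 0
  · rw [solution_nonpos num_list n h]
    unfold solution_alt
    rw [if_pos h]
  · have hn : 1 ≤ n := by omega
    rw [solution_eq_chunksN num_list n hn, alt_eq_chunksN num_list n hn]
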